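-- pv_equiv track=rewrite | github.com/tallosim/advent-of-code | 2023/day7/part-2.py | evaulate_hand
-- ===== SOURCE A (Python) =====
-- def evaulate_hand(hand):
--     def score(hand, base_score):
--         total_score = base_score * 16**5
--         for i, card in enumerate(hand):
--             total_score += card * (16 ** (4 - i))
--
--         return total_score
--
--     joker_count = hand.count(1)
--     joker_free_hand = [card for card in hand if card != 1]
--
--     counter = {}
--     for card in joker_free_hand:
--         counter[card] = hand.count(card)
--
--     # Five of a kind
--     if 5 in counter.values() or 5 - joker_count in counter.values() or joker_count == 5:
--         return score(hand, 6)
--     # Four of a kind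
--     if 4 in counter.values() or 4 - joker_count in counter.values():
--         return score(hand, 5)
--     # Full house
--     if (3 in counter.values() and 2 in counter.values()) or (
--         list(counter.values()).count(2) == 2 and joker_count == 1
--     ):
--         return score(hand, 4)
--     # Three of a kind
--     if 3 in counter.values() or 3 - joker_count in counter.values():
--         return score(hand, 3)
--     # Two pairs
--     if list(counter.values()).count(2) == 2:
--         return score(hand, 2)
--     # One pair
--     if 2 in counter.values() or 2 - joker_count in counter.values():
--         return score(hand, 1)
--     # High card
--     return score(hand, 0)
-- ===== SOURCE B (Python) =====
-- def evaulate_hand(hand):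
--     def score(hand, base_score):
--         total_score = base_score * 16**5
--         for i, card in enumerate(hand):
--             total_score += card * (16 ** (4 - i))
--         return total_score
--
--     def classify(values, jokers):
--         sig = sorted(values, reverse=True) or [0]
--         top = sig[0] + jokers
--         second = sig[1] if len(sig) > 1 else 0
--         if top == 5:
--             return 6
--         if top == 4:
--             return 5
--         if top == 3:
--             return 4 if second >= 2 else 3
--         if top == 2:
--             return 2 if second == 2 else 1
--         return 0
--
--     jokers = hand.count(1)
--     counter = {}
--     for card in hand:
--         if card != 1:
--             counter[card] = hand.count(card)
--
--     return score(hand, classify(counter.values(), jokers))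
-- ===== Notes on version B (the rewrite author's own statement) =====
-- stated objective: alternative
-- what changed: B replaces A's cascade of six 'k in counter.values()' / 'k - joker_count in counter.values()' membership tests by computing the sorted-descending count signature once (largest count plus the joker count, and the second-largest count) and classifying the hand type arithmetically from that signature.
-- intended difference: On all-joker hands of length 2-4 (degenerate, not 5-card) A returns the high-card base 0 (all its membership tests miss the empty counter) while B counts the jokers themselves as an of-a-kind group (pair / three / four of a kind), the intended reading of jokers as wildcards. — e.g. on evaulate_hand([1, 1]): A returns 69632, B returns 1118208
-- outside the precondition, e.g. on evaulate_hand([2, 3, 4, 5, 6, 7]): A returns 144470.4375, B returns 144470.4375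
import Mathlib
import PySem

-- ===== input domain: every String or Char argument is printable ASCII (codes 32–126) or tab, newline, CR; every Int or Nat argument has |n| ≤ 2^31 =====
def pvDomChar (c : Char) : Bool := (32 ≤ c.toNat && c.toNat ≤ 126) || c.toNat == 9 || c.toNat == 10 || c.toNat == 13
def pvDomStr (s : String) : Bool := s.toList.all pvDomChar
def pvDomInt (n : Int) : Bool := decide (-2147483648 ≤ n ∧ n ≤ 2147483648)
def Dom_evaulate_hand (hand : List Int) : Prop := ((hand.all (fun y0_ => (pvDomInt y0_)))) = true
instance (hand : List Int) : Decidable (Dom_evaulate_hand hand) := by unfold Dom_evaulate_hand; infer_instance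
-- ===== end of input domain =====

-- B replaces A's cascade of `k - joker_count in counter.values()` membership tests by a single
-- sorted-descending count signature (top count + jokers, second count) classified arithmetically;
-- objective: alternative (same cost on 5-card hands, a clearer judge).

-- ===== PORT A =====
-- score(hand, base): exponent 4 - i is ≥ 0 for i ≤ 4, exact on Pre_ (len ≤ 5); beyond, Python leaves Int (float)
def pvScore (hand : List Int) (base : Int) : Int :=
  (PySem.List.enumerate hand).foldl (fun t p => t + p.2 * 16 ^ ((4 - p.1).toNat)) (base * 16 ^ 5)

def evaulate_hand (hand : List Int) : Int :=
  let joker_count : Int := (PySem.List.count hand 1 : Nat)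
  let joker_free_hand := hand.filter (fun card => card != 1)
  let counter : PySem.Dict Int Int :=
    joker_free_hand.foldl (fun d card => d.insert card ((PySem.List.count hand card : Nat) : Int)) PySem.Dict.empty
  if (5:Int) ∈ counter.values ∨ 5 - joker_count ∈ counter.values ∨ joker_count = 5 then pvScore hand 6
  else if (4:Int) ∈ counter.values ∨ 4 - joker_count ∈ counter.values then pvScore hand 5
  else if ((3:Int) ∈ counter.values ∧ (2:Int) ∈ counter.values) ∨
      (PySem.List.count counter.values 2 = 2 ∧ joker_count = 1) then pvScore hand 4
  else if (3:Int) ∈ counter.values ∨ 3 - joker_count ∈ counter.values then pvScore hand 3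
  else if PySem.List.count counter.values 2 = 2 then pvScore hand 2
  else if (2:Int) ∈ counter.values ∨ 2 - joker_count ∈ counter.values then pvScore hand 1
  else pvScore hand 0

-- ===== PORT B =====
-- classify(values, jokers) from Source B: sorted-descending signature, 'sig[1] if len(sig) > 1 else 0' = (sig.drop 1).headD 0
def pvClassify (values : List Int) (jokers : Int) : Int :=
  let s := PySem.List.sorted values (fun v => v) true
  let sig := if s = [] then [0] else s
  let top := sig.headD 0 + jokers
  let second := (sig.drop 1).headD 0
  if top = 5 then 6
  else if top = 4 then 5
  else if top = 3 then (if 2 ≤ second then 4 else 3)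
  else if top = 2 then (if second = 2 then 2 else 1)
  else 0

def evaulate_hand_alt (hand : List Int) : Int :=
  let jokers : Int := (PySem.List.count hand 1 : Nat)
  let counter : PySem.Dict Int Int :=
    hand.foldl (fun d card =>
      if card != 1 then d.insert card ((PySem.List.count hand card : Nat) : Int) else d) PySem.Dict.empty
  pvScore hand (pvClassify counter.values jokers)

-- ===== PRECONDITION & SPEC =====
-- Pre_ excludes hands longer than 5 cards: there A's 16 ** (4 - i) has a negative exponent and the
-- score becomes a Python float, not an int of the declared return type.
def Pre_evaulate_hand (hand : List Int) : Prop := hand.length ≤ 5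
instance (hand : List Int) : Decidable (Pre_evaulate_hand hand) := by unfold Pre_evaulate_hand; infer_instance
def pvWitness_evaulate_hand : List Int := [2, 2, 3, 3, 4]

-- On all-joker hands of length 2–4 (degenerate, not 5-card) A's membership tests all miss the empty
-- counter and it returns the high-card base 0, while B counts the jokers themselves as an
-- of-a-kind group (pair / three / four of a kind), the intended reading of jokers as wildcards.
def D_evaulate_hand (hand : List Int) : Prop :=
  2 ≤ hand.length ∧ hand.length ≤ 4 ∧ ∀ c ∈ hand, c = 1
instance (hand : List Int) : Decidable (D_evaulate_hand hand) := by unfold D_evaulate_hand; infer_instance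

def Spec_evaulate_hand (hand : List Int) (out : Int) : Prop :=
  ¬ D_evaulate_hand hand → out = evaulate_hand_alt hand
instance (hand : List Int) (out : Int) : Decidable (Spec_evaulate_hand hand out) := by unfold Spec_evaulate_hand; infer_instance

def pvDiffWitness_evaulate_hand : List Int := [1, 1]
def pvDiffWitnessOut_evaulate_hand : Int × Int := (69632, 1118208)

-- ===== CLAIM (what is proved, stated in full; the proofs are below) =====
def Claim_unchanged_evaulate_hand : Prop := ∀ (hand : List Int), Dom_evaulate_hand hand → Pre_evaulate_hand hand → Spec_evaulate_hand hand (evaulate_hand hand)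
def Claim_changed_evaulate_hand : Prop := Dom_evaulate_hand (pvDiffWitness_evaulate_hand) ∧ Pre_evaulate_hand (pvDiffWitness_evaulate_hand) ∧ D_evaulate_hand (pvDiffWitness_evaulate_hand) ∧ evaulate_hand (pvDiffWitness_evaulate_hand) = pvDiffWitnessOut_evaulate_hand.1 ∧ evaulate_hand_alt (pvDiffWitness_evaulate_hand) = pvDiffWitnessOut_evaulate_hand.2 ∧ pvDiffWitnessOut_evaulate_hand.1 ≠ pvDiffWitnessOut_evaulate_hand.2
def Claim_exact_evaulate_hand : Prop := ∀ (hand : List Int), Dom_evaulate_hand hand → Pre_evaulate_hand hand → D_evaulate_hand hand → evaulate_hand hand ≠ evaulate_hand_alt hand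

-- ===== LEMMAS AND PROOFS =====

-- A's base, as a function of the counter's values list and the joker count
def pvBaseA (vs : List Int) (j : Int) : Int :=
  if (5:Int) ∈ vs ∨ 5 - j ∈ vs ∨ j = 5 then 6
  else if (4:Int) ∈ vs ∨ 4 - j ∈ vs then 5
  else if ((3:Int) ∈ vs ∧ (2:Int) ∈ vs) ∨ (PySem.List.count vs 2 = 2 ∧ j = 1) then 4
  else if (3:Int) ∈ vs ∨ 3 - j ∈ vs then 3
  else if PySem.List.count vs 2 = 2 then 2
  else if (2:Int) ∈ vs ∨ 2 - j ∈ vs then 1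
  else 0

-- the counter both ports build
def pvCounter (hand : List Int) : PySem.Dict Int Int :=
  (hand.filter (fun card => card != 1)).foldl
    (fun d card => d.insert card ((PySem.List.count hand card : Nat) : Int)) PySem.Dict.empty

lemma portA_eq (hand : List Int) :
    evaulate_hand hand = pvScore hand (pvBaseA (pvCounter hand).values ((PySem.List.count hand 1 : Nat) : Int)) := by
  unfold evaulate_hand pvBaseA pvCounter
  dsimp only
  split_ifs <;> rfl

lemma portB_eq (hand : List Int) :
    evaulate_hand_alt hand = pvScore hand (pvClassify (pvCounter hand).values ((PySem.List.count hand 1 : Nat) : Int)) := by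
  unfold evaulate_hand_alt pvCounter
  dsimp only
  rw [PySem.List.foldl_if_eq_foldl_filter (fun card : Int => card != 1)
    (fun (d : PySem.Dict Int Int) card => d.insert card ((PySem.List.count hand card : Nat) : Int)) hand PySem.Dict.empty]

lemma get?_foldl_insert_const (c : Int → Int) (l : List Int) (d : PySem.Dict Int Int) (k : Int) :
    (l.foldl (fun d x => d.insert x (c x)) d).get? k = if k ∈ l then some (c k) else d.get? k := by
  induction l generalizing d with
  | nil => simp
  | cons x t ih =>
    simp only [List.foldl_cons, ih, List.mem_cons]
    by_cases hk : k = x <;> by_cases hm : k ∈ t <;>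
      simp [hk, hm, PySem.Dict.get?_insert]

lemma values_pvCounter (hand : List Int) :
    (pvCounter hand).values
      = (PySem.List.dedup (hand.filter (fun card => card != 1))).map
          (fun k => ((PySem.List.count hand k : Nat) : Int)) := by
  unfold pvCounter
  have hkeys : ((hand.filter (fun card => card != 1)).foldl
      (fun d card => d.insert card ((PySem.List.count hand card : Nat) : Int)) PySem.Dict.empty).keys
      = PySem.List.dedup (hand.filter (fun card => card != 1)) := by
    rw [PySem.Dict.keys_foldl_insert]
    simp [PySem.Set.update, PySem.List.dedup_eq_ofList, PySem.Set.ofList_eq_foldl,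
      PySem.Dict.keys_empty]
  have hnd : ((hand.filter (fun card => card != 1)).foldl
      (fun d card => d.insert card ((PySem.List.count hand card : Nat) : Int)) PySem.Dict.empty).keys.Nodup := by
    rw [hkeys]; exact PySem.List.nodup_dedup _
  rw [PySem.Dict.values_eq_map_keys _ hnd 0, hkeys]
  refine List.map_congr_left (fun k hk => ?_)
  rw [PySem.Dict.getD_eq_get?_getD, get?_foldl_insert_const]
  simp [(PySem.List.mem_dedup _ _).mp hk]

lemma length_le_sum_of_one_le (l : List Int) (h : ∀ v ∈ l, 1 ≤ v) : (l.length : Int) ≤ l.sum := by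
  induction l with
  | nil => simp
  | cons x t ih =>
    have hx := h x (List.mem_cons_self)
    have := ih (fun v hv => h v (List.mem_cons_of_mem _ hv))
    simp only [List.length_cons, List.sum_cons]
    push_cast
    omega

-- the heart: A's cascade equals B's signature table on every values/jokers pair a ≤5-card hand can
-- produce, outside the all-joker D_ region
lemma base_eq_classify (vs : List Int) (j n : Int)
    (hpos : ∀ v ∈ vs, 1 ≤ v) (hj : 0 ≤ j) (hsum : vs.sum + j = n) (hn : n ≤ 5)
    (hD : vs = [] → j = 0 ∨ j = 1 ∨ j = 5) :
    pvBaseA vs j = pvClassify vs j := by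
  have hlen : (vs.length : Int) ≤ vs.sum := length_le_sum_of_one_le vs hpos
  have hsum_nonneg : 0 ≤ vs.sum := le_trans (by positivity) hlen
  have hj5 : j ≤ 5 := by omega
  match vs, hlen with
  | [], _ =>
    rcases hD rfl with h | h | h <;> subst h <;> decide
  | [a], _ =>
    have ha := hpos a (by simp)
    simp only [List.sum_cons, List.sum_nil, add_zero] at hsum
    have ha5 : a ≤ 5 := by omega
    interval_cases a <;> interval_cases j <;> first | decide | omega
  | [a, b], _ =>
    have ha := hpos a (by simp)
    have hb := hpos b (by simp)
    simp only [List.sum_cons, List.sum_nil, add_zero] at hsum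
    have ha4 : a ≤ 4 := by omega
    have hb4 : b ≤ 4 := by omega
    interval_cases a <;> interval_cases b <;> interval_cases j <;> first | decide | omega
  | [a, b, c], _ =>
    have ha := hpos a (by simp)
    have hb := hpos b (by simp)
    have hc := hpos c (by simp)
    simp only [List.sum_cons, List.sum_nil, add_zero] at hsum
    have ha3 : a ≤ 3 := by omega
    have hb3 : b ≤ 3 := by omega
    have hc3 : c ≤ 3 := by omega
    interval_cases a <;> interval_cases b <;> interval_cases c <;> interval_cases j <;>
      first | decide | omega
  | [a, b, c, d], _ =>
    have ha := hpos a (by simp)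
    have hb := hpos b (by simp)
    have hc := hpos c (by simp)
    have hd := hpos d (by simp)
    simp only [List.sum_cons, List.sum_nil, add_zero] at hsum
    have ha2 : a ≤ 2 := by omega
    have hb2 : b ≤ 2 := by omega
    have hc2 : c ≤ 2 := by omega
    have hd2 : d ≤ 2 := by omega
    interval_cases a <;> interval_cases b <;> interval_cases c <;> interval_cases d <;>
      interval_cases j <;> first | decide | omega
  | [a, b, c, d, e], _ =>
    have ha := hpos a (by simp)
    have hb := hpos b (by simp)
    have hc := hpos c (by simp)
    have hd := hpos d (by simp)
    have he := hpos e (by simp)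
    simp only [List.sum_cons, List.sum_nil, add_zero] at hsum
    have ha1 : a = 1 := by omega
    have hb1 : b = 1 := by omega
    have hc1 : c = 1 := by omega
    have hd1 : d = 1 := by omega
    have he1 : e = 1 := by omega
    have hj0 : j = 0 := by omega
    subst ha1; subst hb1; subst hc1; subst hd1; subst he1; subst hj0; decide
  | a :: b :: c :: d :: e :: f :: t, hlen =>
    exfalso
    have := hpos a (by simp)
    simp only [List.length_cons] at hlen
    push_cast at hlen
    omega

lemma filter_ne_one_length (hand : List Int) :
    (hand.filter (fun card => card != 1)).length + List.count 1 hand = hand.length := by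
  induction hand with
  | nil => simp
  | cons x t ih =>
    by_cases hx : x = 1 <;>
      simp [hx, ← ih] <;> omega

theorem evaulate_hand_spec : Claim_unchanged_evaulate_hand := by
  intro hand _ hpre hnD
  rw [portA_eq, portB_eq]
  congr 1
  set jf := hand.filter (fun card => card != 1) with hjf
  -- the values list and its facts
  have hvals := values_pvCounter hand
  have hcount_eq : ∀ k ∈ PySem.List.dedup jf, PySem.List.count hand k = List.count k jf := by
    intro k hk
    have hkjf : k ∈ jf := (PySem.List.mem_dedup _ _).mp hk
    rw [hjf] at hkjf
    have hp : (fun card => card != 1) k = true := List.of_mem_filter (p := fun card => card != 1) hkjf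
    rw [PySem.List.count_eq, hjf]
    exact (List.count_filter (p := fun card => card != 1) hp).symm
  -- sum of values = number of non-joker cards
  have hperm : (PySem.List.dedup jf).Perm jf.dedup := by
    refine (List.perm_ext_iff_of_nodup (PySem.List.nodup_dedup _) (List.nodup_dedup jf)).mpr ?_
    intro x
    rw [PySem.List.mem_dedup, List.mem_dedup]
  have hsum : ((pvCounter hand).values.sum : Int) + ((PySem.List.count hand 1 : Nat) : Int)
      = (hand.length : Int) := by
    rw [hvals]
    have h1 : ((PySem.List.dedup jf).map (fun k => ((PySem.List.count hand k : Nat) : Int))).sum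
        = ((PySem.List.dedup jf).map (fun k => ((List.count k jf : Nat) : Int))).sum := by
      refine congrArg List.sum (List.map_congr_left ?_)
      intro k hk; rw [hcount_eq k hk]
    have h2 : ((PySem.List.dedup jf).map (fun k => ((List.count k jf : Nat) : Int))).sum
        = ((jf.dedup).map (fun k => ((List.count k jf : Nat) : Int))).sum :=
      (hperm.map _).sum_eq
    have h3 := List.sum_map_count_dedup_eq_length jf
    have h4 : ((jf.dedup).map (fun k => ((List.count k jf : Nat) : Int))).sum
        = ((jf.length : Nat) : Int) := by
      rw [← h3, Nat.cast_list_sum, List.map_map]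
      rfl
    have h5 := filter_ne_one_length hand
    rw [← hjf] at h5
    rw [PySem.List.count_eq]
    rw [h1, h2, h4]
    omega
  -- positivity of values
  have hpos : ∀ v ∈ (pvCounter hand).values, 1 ≤ v := by
    rw [hvals]
    intro v hv
    rcases List.mem_map.mp hv with ⟨k, hk, rfl⟩
    have hkjf : k ∈ jf := (PySem.List.mem_dedup _ _).mp hk
    have : k ∈ hand := List.mem_of_mem_filter hkjf
    have := List.count_pos_iff.mpr this
    rw [PySem.List.count_eq]
    omega
  -- empty values means an all-joker hand; ¬D_ then pins the joker count
  have hD : (pvCounter hand).values = [] → ((PySem.List.count hand 1 : Nat) : Int) = 0 ∨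
      ((PySem.List.count hand 1 : Nat) : Int) = 1 ∨ ((PySem.List.count hand 1 : Nat) : Int) = 5 := by
    intro hv
    rw [hvals] at hv
    have hjfnil : jf = [] := by
      rcases List.eq_nil_or_concat jf with h | ⟨l, x, h⟩
      · exact h
      · exfalso
        have hx : x ∈ jf := by rw [h]; simp
        have : x ∈ PySem.List.dedup jf := (PySem.List.mem_dedup _ _).mpr hx
        rw [List.map_eq_nil_iff.mp hv] at this
        simp at this
    have hall : ∀ c ∈ hand, c = 1 := by
      intro c hc
      by_contra hne
      have : c ∈ jf := by
        rw [hjf]; refine List.mem_filter.mpr ⟨hc, by simpa using hne⟩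
      rw [hjfnil] at this; simp at this
    have hj : List.count 1 hand = hand.length := by
      rw [List.count_eq_length]
      intro c hc; exact (hall c hc).symm
    unfold D_evaulate_hand at hnD
    push Not at hnD
    rw [PySem.List.count_eq, hj]
    unfold Pre_evaulate_hand at hpre
    by_cases h2 : 2 ≤ hand.length
    · by_cases h4 : hand.length ≤ 4
      · exact absurd (hnD h2 h4) (by push Not; exact fun c hc => hall c hc)
      · right; right; omega
    · omega
  exact base_eq_classify _ _ (hand.length : Int) hpos (by positivity) hsum
    (by unfold Pre_evaulate_hand at hpre; exact_mod_cast hpre) hD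

theorem evaulate_hand_changed : Claim_changed_evaulate_hand := by
  unfold Claim_changed_evaulate_hand; decide

theorem evaulate_hand_tight : Claim_exact_evaulate_hand := by
  intro hand _ hpre hD
  rcases hD with ⟨h2, h4, hall⟩
  match hand, h2, h4, hall with
  | [a, b], _, _, hall =>
    have ha := hall a (by simp); have hb := hall b (by simp)
    subst ha; subst hb; decide
  | [a, b, c], _, _, hall =>
    have ha := hall a (by simp); have hb := hall b (by simp); have hc := hall c (by simp)
    subst ha; subst hb; subst hc; decide
  | [a, b, c, d], _, _, hall =>
    have ha := hall a (by simp); have hb := hall b (by simp)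
    have hc := hall c (by simp); have hd := hall d (by simp)
    subst ha; subst hb; subst hc; subst hd; decide
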